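-- pv_equiv track=rewrite | github.com/melissaturk/DocRED | util.py | build_wordpiece_maps
-- ===== SOURCE A (Python) =====
-- from typing import Dict, List, Tuple
--
-- def build_wordpiece_maps(word_ids: List[int | None]):
--     """Build mappings word_idx → (wp_start, wp_end) inclusive."""
--     start_map: Dict[int, int] = {}
--     end_map: Dict[int, int] = {}
--     for wp_idx, w_idx in enumerate(word_ids):
--         if w_idx is None:
--             continue
--         if w_idx not in start_map:
--             start_map[w_idx] = wp_idx
--         end_map[w_idx] = wp_idx
--     return start_map, end_map
-- ===== SOURCE B (Python) =====
-- from typing import Dict, List, Tuple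
--
-- def build_wordpiece_maps(word_ids):
--     """Build mappings word_idx -> (wp_start, wp_end) inclusive."""
--     groups: Dict[int, List[int]] = {}
--     for wp_idx, w_idx in enumerate(word_ids):
--         if w_idx is None:
--             continue
--         groups.setdefault(w_idx, []).append(wp_idx)
--     start_map: Dict[int, int] = {}
--     end_map: Dict[int, int] = {}
--     for w, ps in groups.items():
--         start_map[w] = ps[0]
--         end_map[w] = ps[-1]
--     return start_map, end_map
-- ===== Notes on version B (the rewrite author's own statement) =====
-- stated objective: alternative
-- what changed: Replaces the interleaved first/last-occurrence dict updates with a two-pass grouping: first collect each word's wordpiece positions into a dict of lists, then derive start/end maps from each list's endpoints.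
import Mathlib
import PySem

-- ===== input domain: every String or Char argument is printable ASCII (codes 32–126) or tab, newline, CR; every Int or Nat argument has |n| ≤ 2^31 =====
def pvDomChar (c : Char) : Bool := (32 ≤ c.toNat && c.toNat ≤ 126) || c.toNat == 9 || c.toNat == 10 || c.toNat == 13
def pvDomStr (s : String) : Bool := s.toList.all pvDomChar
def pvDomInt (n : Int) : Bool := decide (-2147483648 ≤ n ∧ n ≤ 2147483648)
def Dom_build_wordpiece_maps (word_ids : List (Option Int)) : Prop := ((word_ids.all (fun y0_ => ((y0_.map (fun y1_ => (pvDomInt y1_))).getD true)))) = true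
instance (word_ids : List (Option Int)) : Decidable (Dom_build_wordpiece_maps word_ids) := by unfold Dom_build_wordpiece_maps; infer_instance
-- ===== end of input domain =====

-- B replaces A's interleaved first/last-occurrence dict updates with a two-pass grouping
-- (dict of position lists, then endpoints) — an alternative decomposition, same cost.


-- ===== PORT A =====
def build_wordpiece_maps (word_ids : List (Option Int)) : (List (Int × Int)) × (List (Int × Int)) :=
  let maps := (PySem.List.enumerate word_ids).foldl
    (fun (acc : PySem.Dict Int Int × PySem.Dict Int Int) p =>
      match p.2 with
      | none => acc
      | some w =>
        ((if acc.1.contains w then acc.1 else acc.1.insert w p.1), acc.2.insert w p.1))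
    (PySem.Dict.empty, PySem.Dict.empty)
  (maps.1.items, maps.2.items)

-- ===== PORT B =====
def build_wordpiece_maps_alt (word_ids : List (Option Int)) : (List (Int × Int)) × (List (Int × Int)) :=
  let groups := (PySem.List.enumerate word_ids).foldl
    (fun (g : PySem.Dict Int (List Int)) p =>
      match p.2 with
      | none => g
      | some w => g.modify w [] (fun ps => ps ++ [p.1]))
    PySem.Dict.empty
  -- ps[0] / ps[-1]: every list stored in groups is nonempty, so headD / getLastD with a
  -- dummy default port ps[0] / ps[-1] exactly on every reachable state
  let start_map := groups.items.foldl
    (fun (d : PySem.Dict Int Int) p => d.insert p.1 (p.2.headD 0)) PySem.Dict.empty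
  let end_map := groups.items.foldl
    (fun (d : PySem.Dict Int Int) p => d.insert p.1 (p.2.getLastD 0)) PySem.Dict.empty
  (start_map.items, end_map.items)

-- ===== PRECONDITION & SPEC =====
def Spec_build_wordpiece_maps (word_ids : List (Option Int)) (out : (List (Int × Int)) × (List (Int × Int))) : Prop := out = build_wordpiece_maps_alt word_ids
instance (word_ids : List (Option Int)) (out : (List (Int × Int)) × (List (Int × Int))) : Decidable (Spec_build_wordpiece_maps word_ids out) := by unfold Spec_build_wordpiece_maps; infer_instance

-- ===== CLAIM (what is proved, stated in full; the proofs are below) =====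
def Claim_equal_build_wordpiece_maps : Prop := ∀ (word_ids : List (Option Int)), Dom_build_wordpiece_maps word_ids → Spec_build_wordpiece_maps word_ids (build_wordpiece_maps word_ids)

-- ===== LEMMAS AND PROOFS =====

-- first element of each group, as a dict
def hdD (g : PySem.Dict Int (List Int)) : PySem.Dict Int Int :=
  PySem.Dict.mk (g.items.map (fun p => (p.1, p.2.headD 0)))

-- last element of each group, as a dict
def lstD (g : PySem.Dict Int (List Int)) : PySem.Dict Int Int :=
  PySem.Dict.mk (g.items.map (fun p => (p.1, p.2.getLastD 0)))

-- invariant on the grouping dict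
def GrpInv (g : PySem.Dict Int (List Int)) : Prop :=
  (∀ p ∈ g.items, p.2 ≠ []) ∧ g.keys.Nodup

theorem keys_hdD (g : PySem.Dict Int (List Int)) : (hdD g).keys = g.keys := by
  simp [hdD, PySem.Dict.keys]

theorem keys_lstD (g : PySem.Dict Int (List Int)) : (lstD g).keys = g.keys := by
  simp [lstD, PySem.Dict.keys]

theorem modify_eq (d : PySem.Dict Int (List Int)) (k : Int) (f : List Int → List Int) :
    d.modify k [] f = d.insert k (f (d.getD k [])) := rfl

theorem headD_append_of_ne_nil {l t : List Int} (d : Int) (h : l ≠ []) :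
    (l ++ t).headD d = l.headD d := by
  cases l with
  | nil => exact absurd rfl h
  | cons a l => simp

theorem contains_eq_of_keys_eq (d : PySem.Dict Int Int) (g : PySem.Dict Int (List Int))
    (w : Int) (h : d.keys = g.keys) : d.contains w = g.contains w := by
  rw [PySem.Dict.contains_eq_decide_mem_keys, PySem.Dict.contains_eq_decide_mem_keys, h]

theorem inv_step (g : PySem.Dict Int (List Int)) (w i : Int) (h : GrpInv g) :
    GrpInv (g.modify w [] (fun ps => ps ++ [i])) := by
  obtain ⟨hne, hnd⟩ := h
  rw [modify_eq]
  by_cases hc : g.contains w = true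
  · constructor
    · intro p hp
      rw [PySem.Dict.items_insert_of_contains _ _ hc] at hp
      obtain ⟨q, hq, rfl⟩ := List.mem_map.mp hp
      by_cases hqw : (q.1 == w) = true
      · simp [hqw]
      · simp only [hqw]
        simpa using hne q hq
    · rw [PySem.Dict.keys_insert_of_contains _ _ hc]; exact hnd
  · constructor
    · intro p hp
      rw [PySem.Dict.items_insert_of_not_contains _ _ (by simpa using hc)] at hp
      rcases List.mem_append.mp hp with hp | hp
      · exact hne p hp
      · simp at hp; simp [hp]
    · rw [PySem.Dict.keys_insert_of_not_contains _ _ (by simpa using hc)]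
      rw [List.nodup_append]
      refine ⟨hnd, List.nodup_singleton _, ?_⟩
      intro a ha b hb hab
      rw [List.mem_singleton] at hb
      rw [hab, hb] at ha
      exact hc ((PySem.Dict.contains_iff_mem_keys _ _).mpr ha)

theorem main_step (g : PySem.Dict Int (List Int)) (w i : Int) (h : GrpInv g) :
    ((if (hdD g).contains w then hdD g else (hdD g).insert w i),
      (lstD g).insert w i)
      = (hdD (g.modify w [] (fun ps => ps ++ [i])),
         lstD (g.modify w [] (fun ps => ps ++ [i]))) := by
  obtain ⟨hne, hnd⟩ := h
  rw [modify_eq]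
  have hch : (hdD g).contains w = g.contains w := contains_eq_of_keys_eq _ _ _ (keys_hdD g)
  have hcl : (lstD g).contains w = g.contains w := contains_eq_of_keys_eq _ _ _ (keys_lstD g)
  by_cases hc : g.contains w = true
  · -- existing key: start map unchanged, end map overwritten in place
    have h1 : hdD (g.insert w (g.getD w [] ++ [i])) = hdD g := by
      apply PySem.Dict.ext
      show ((g.insert w (g.getD w [] ++ [i])).items).map (fun p => (p.1, p.2.headD 0))
          = g.items.map (fun p => (p.1, p.2.headD 0))
      rw [PySem.Dict.items_insert_of_contains _ _ hc, List.map_map]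
      apply List.map_congr_left
      intro p hp
      by_cases hqw : (p.1 == w) = true
      · have hpw : p.1 = w := by simpa using hqw
        have hgd : g.getD w [] = p.2 :=
          PySem.Dict.getD_of_mem_items _ (by rw [← hpw]; exact hp) hnd _
        simp only [Function.comp, hqw, if_pos, hgd]
        rw [headD_append_of_ne_nil _ (hne p hp), hpw]
      · simp [Function.comp, hqw]
    have h2 : lstD (g.insert w (g.getD w [] ++ [i])) = (lstD g).insert w i := by
      apply PySem.Dict.ext
      have hcl' : (lstD g).contains w = true := by rw [hcl]; exact hc
      show ((g.insert w (g.getD w [] ++ [i])).items).map (fun p => (p.1, p.2.getLastD 0))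
          = ((lstD g).insert w i).items
      rw [PySem.Dict.items_insert_of_contains _ _ hc,
        PySem.Dict.items_insert_of_contains _ _ hcl', List.map_map]
      simp only [lstD, List.map_map]
      apply List.map_congr_left
      intro p hp
      by_cases hqw : (p.1 == w) = true
      · simp [Function.comp, hqw]
      · simp [Function.comp, hqw]
    rw [hch, if_pos hc, h1, h2]
  · -- new key: both maps get the fresh entry appended
    have hc' : g.contains w = false := by simpa using hc
    have hgd : g.getD w [] = [] := PySem.Dict.getD_of_not_contains _ _ hc'
    have h1 : hdD (g.insert w (g.getD w [] ++ [i])) = (hdD g).insert w i := by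
      apply PySem.Dict.ext
      have hch' : (hdD g).contains w = false := by rw [hch]; exact hc'
      show ((g.insert w (g.getD w [] ++ [i])).items).map (fun p => (p.1, p.2.headD 0))
          = ((hdD g).insert w i).items
      rw [PySem.Dict.items_insert_of_not_contains _ _ hc',
        PySem.Dict.items_insert_of_not_contains _ _ hch', hgd]
      simp [hdD]
    have h2 : lstD (g.insert w (g.getD w [] ++ [i])) = (lstD g).insert w i := by
      apply PySem.Dict.ext
      have hcl' : (lstD g).contains w = false := by rw [hcl]; exact hc'
      show ((g.insert w (g.getD w [] ++ [i])).items).map (fun p => (p.1, p.2.getLastD 0))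
          = ((lstD g).insert w i).items
      rw [PySem.Dict.items_insert_of_not_contains _ _ hc',
        PySem.Dict.items_insert_of_not_contains _ _ hcl', hgd]
      simp [lstD]
    rw [hch, if_neg (by simp [hc']), h1, h2]

theorem main_fold (l : List (Int × Option Int)) :
    ∀ g : PySem.Dict Int (List Int), GrpInv g →
    l.foldl
      (fun (acc : PySem.Dict Int Int × PySem.Dict Int Int) p =>
        match p.2 with
        | none => acc
        | some w =>
          ((if acc.1.contains w then acc.1 else acc.1.insert w p.1), acc.2.insert w p.1))
      (hdD g, lstD g)
      = (hdD (l.foldl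
          (fun (g : PySem.Dict Int (List Int)) p =>
            match p.2 with
            | none => g
            | some w => g.modify w [] (fun ps => ps ++ [p.1])) g),
         lstD (l.foldl
          (fun (g : PySem.Dict Int (List Int)) p =>
            match p.2 with
            | none => g
            | some w => g.modify w [] (fun ps => ps ++ [p.1])) g)) := by
  induction l with
  | nil => intro g h; rfl
  | cons p l ih =>
    intro g h
    match hp : p.2 with
    | none => simp only [List.foldl_cons, hp]; exact ih g h
    | some w =>
      simp only [List.foldl_cons, hp, main_step g w p.1 h]
      exact ih _ (inv_step g w p.1 h)

theorem inv_fold (l : List (Int × Option Int)) :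
    ∀ g : PySem.Dict Int (List Int), GrpInv g →
    GrpInv (l.foldl
      (fun (g : PySem.Dict Int (List Int)) p =>
        match p.2 with
        | none => g
        | some w => g.modify w [] (fun ps => ps ++ [p.1])) g) := by
  induction l with
  | nil => intro g h; exact h
  | cons p l ih =>
    intro g h
    match hp : p.2 with
    | none => simp only [List.foldl_cons, hp]; exact ih g h
    | some w => simp only [List.foldl_cons, hp]; exact ih _ (inv_step g w p.1 h)

theorem second_pass_hd (g : PySem.Dict Int (List Int)) (h : g.keys.Nodup) :
    g.items.foldl (fun (d : PySem.Dict Int Int) p => d.insert p.1 (p.2.headD 0))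
      PySem.Dict.empty = hdD g := by
  apply PySem.Dict.ext
  rw [PySem.Dict.items_foldl_insert_fresh _ _ _ _ (fun a _ => by simp)
    (by simpa [PySem.Dict.keys] using h)]
  simp [hdD, PySem.Dict.empty]

theorem second_pass_lst (g : PySem.Dict Int (List Int)) (h : g.keys.Nodup) :
    g.items.foldl (fun (d : PySem.Dict Int Int) p => d.insert p.1 (p.2.getLastD 0))
      PySem.Dict.empty = lstD g := by
  apply PySem.Dict.ext
  rw [PySem.Dict.items_foldl_insert_fresh _ _ _ _ (fun a _ => by simp)
    (by simpa [PySem.Dict.keys] using h)]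
  simp [lstD, PySem.Dict.empty]

-- ===== VERDICT (by name: the statement is the Claim_ definition above) =====
theorem build_wordpiece_maps_spec : Claim_equal_build_wordpiece_maps := by
  intro word_ids _
  unfold Spec_build_wordpiece_maps build_wordpiece_maps build_wordpiece_maps_alt
  have h0 : GrpInv PySem.Dict.empty := ⟨by simp [PySem.Dict.empty], by simp [PySem.Dict.empty, PySem.Dict.keys]⟩
  have hinv := inv_fold (PySem.List.enumerate word_ids) PySem.Dict.empty h0
  have h := main_fold (PySem.List.enumerate word_ids) PySem.Dict.empty h0
  have he : (hdD PySem.Dict.empty, lstD PySem.Dict.empty)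
      = ((PySem.Dict.empty : PySem.Dict Int Int), (PySem.Dict.empty : PySem.Dict Int Int)) := rfl
  rw [← he, h]
  exact congrArg₂ Prod.mk
    (congrArg PySem.Dict.items (second_pass_hd _ hinv.2).symm)
    (congrArg PySem.Dict.items (second_pass_lst _ hinv.2).symm)
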